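-- pv_equiv track=rewrite | github.com/pbaghershahi/map-update | kde/evaluation.py | stick_edge
-- ===== SOURCE A (Python) =====
-- def stick_edge(point_edge_list):
--     big_edges = {}
--     while len(point_edge_list) > 0:
--         point_key, edge_ids = point_edge_list.popitem()
--         edge_ids = list(edge_ids)
--         # for nodes with common edges union the the other nodes have the same shred edge
--         for edge_id in edge_ids:
--             for point, edges in point_edge_list.copy().items():
--                 if edge_id in edges:
--                     _ = point_edge_list.pop(point)
--                     edge_ids += list(edges.difference(set(edge_ids)))
--         big_edges[point_key] = set(edge_ids)
--     return big_edges
-- ===== SOURCE B (Python) =====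
-- def stick_edge(point_edge_list):
--     # Edge->points index + BFS with a visited set: one pass builds the index, so the
--     # O(n) rescan of all remaining points per edge disappears. Does not mutate the
--     # argument (A empties it); return value is identical.
--     items = list(point_edge_list.items())
--     index = {}
--     for p, edges in items:
--         for e in edges:
--             index.setdefault(e, []).append(p)
--     visited = set()
--     big_edges = {}
--     for p, p_edges in reversed(items):
--         if p in visited:
--             continue
--         visited.add(p)
--         edge_ids = list(p_edges)
--         seen = set(edge_ids)
--         i = 0
--         while i < len(edge_ids):
--             e = edge_ids[i]
--             for q in index.get(e, []):
--                 if q not in visited: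
--                     visited.add(q)
--                     new = [x for x in point_edge_list[q] if x not in seen]
--                     edge_ids += new
--                     seen.update(new)
--             i += 1
--         big_edges[p] = set(edge_ids)
--     return big_edges
-- ===== Notes on version B (the rewrite author's own statement) =====
-- stated objective: faster
-- what changed: B builds an edge->points index once and walks each connected component via that index with a visited set (reverse iteration picks the same representatives as A's popitem), so A's rescan of the whole remaining dict for every edge id disappears.
import Mathlib
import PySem

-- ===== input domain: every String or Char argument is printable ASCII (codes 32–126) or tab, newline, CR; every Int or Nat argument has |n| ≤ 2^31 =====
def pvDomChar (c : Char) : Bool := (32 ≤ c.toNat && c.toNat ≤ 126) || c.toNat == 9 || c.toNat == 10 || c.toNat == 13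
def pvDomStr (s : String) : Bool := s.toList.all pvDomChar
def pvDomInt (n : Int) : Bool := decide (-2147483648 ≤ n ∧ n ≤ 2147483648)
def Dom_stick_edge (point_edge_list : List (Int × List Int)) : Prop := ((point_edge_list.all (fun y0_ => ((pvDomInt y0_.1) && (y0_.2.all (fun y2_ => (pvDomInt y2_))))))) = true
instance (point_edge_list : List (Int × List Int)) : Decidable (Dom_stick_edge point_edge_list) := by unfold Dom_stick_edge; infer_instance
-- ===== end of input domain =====

-- B replaces A's per-edge rescan of all remaining points by an edge→points index built
-- once, with a visited set instead of dict mutation (A empties its argument in place; B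
-- does not — the equivalence proved here is about the return value).

-- Call-boundary marshalling shared by both ports: the Python argument is a
-- dict[int, set[int]], so duplicate keys collapse (last value, first position) and
-- duplicate set elements collapse (first occurrence), exactly as dict/set construction does.
def pvNormDict (l : List (Int × List Int)) : PySem.Dict Int (List Int) :=
  l.foldl (fun d kv => d.insert kv.1 (PySem.Set.ofList kv.2)) PySem.Dict.empty

-- fuel bound for the growing-list for-loop 'for edge_id in edge_ids' (a totality guard
-- only: the loop runs at most (number of distinct edges) ≤ Σ|values| times)
def pvFuel (es : List (Int × List Int)) : Nat :=
  es.foldl (fun a q => a + q.2.length) 0 + 1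

-- ===== PORT A =====
-- inner 'for point, edges in point_edge_list.copy().items(): if edge_id in edges: pop; edge_ids += …'
def stickA_scan (e : Int) (snapshot : List (Int × List Int))
    (st : List Int × List (Int × List Int)) : List Int × List (Int × List Int) :=
  snapshot.foldl (fun st q =>
    if e ∈ q.2 then
      (st.1 ++ q.2.filter (fun x => decide (x ∉ st.1)), st.2.eraseP (fun r => r.1 == q.1))
    else st) st

-- 'for edge_id in edge_ids' over the growing list edge_ids (index i)
def stickA_absorb (fuel : Nat) (i : Nat) (ids : List Int)
    (rem : List (Int × List Int)) : List Int × List (Int × List Int) :=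
  match fuel with
  | 0 => (ids, rem)
  | fuel + 1 =>
    if h : i < ids.length then
      let st := stickA_scan ids[i] rem (ids, rem)
      stickA_absorb fuel (i + 1) st.1 st.2
    else (ids, rem)

theorem stickA_scan_len_le (e : Int) (snapshot : List (Int × List Int)) :
    ∀ st : List Int × List (Int × List Int),
      (stickA_scan e snapshot st).2.length ≤ st.2.length := by
  induction snapshot with
  | nil => intro st; simp [stickA_scan]
  | cons q rest ih =>
    intro st
    simp only [stickA_scan, List.foldl_cons]
    by_cases h : e ∈ q.2
    · simp only [if_pos h]
      exact le_trans (ih _) (by simpa using List.length_eraseP_le (l := st.2))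
    · simp only [if_neg h]; exact ih st

theorem stickA_absorb_len_le (fuel : Nat) :
    ∀ (i : Nat) (ids : List Int) (rem : List (Int × List Int)),
      (stickA_absorb fuel i ids rem).2.length ≤ rem.length := by
  induction fuel with
  | zero => intro i ids rem; simp [stickA_absorb]
  | succ fuel ih =>
    intro i ids rem
    simp only [stickA_absorb]
    split
    · exact le_trans (ih _ _ _) (stickA_scan_len_le _ _ _)
    · exact le_refl _

-- 'while len(point_edge_list) > 0: popitem (last); …; big_edges[point_key] = set(edge_ids)'
def stickA_loop (fuel : Nat) (rem acc : List (Int × List Int)) : List (Int × List Int) :=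
  if hne : rem = [] then acc
  else
    let p := rem.getLast hne
    let st := stickA_absorb fuel 0 p.2 rem.dropLast
    stickA_loop fuel st.2 (acc ++ [(p.1, PySem.Set.ofList st.1)])
termination_by rem.length
decreasing_by
  calc (stickA_absorb fuel 0 p.2 rem.dropLast).2.length
      ≤ rem.dropLast.length := stickA_absorb_len_le _ _ _ _
    _ < rem.length := by
        rw [List.length_dropLast]
        have : 0 < rem.length := List.length_pos_iff.mpr hne
        omega

def stick_edge (point_edge_list : List (Int × List Int)) : List (Int × List Int) :=
  let es := (pvNormDict point_edge_list).items
  stickA_loop (pvFuel es) es []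

-- ===== PORT B =====
-- 'for p, edges in items: for e in edges: index.setdefault(e, []).append(p)'
def stickB_index (es : List (Int × List Int)) : PySem.Dict Int (List Int) :=
  es.foldl (fun d q => q.2.foldl (fun d e => d.modify e [] (fun l => l ++ [q.1])) d)
    PySem.Dict.empty

-- 'for q in index.get(e, []): if q not in visited: visited.add(q); new = […]; edge_ids += new; seen.update(new)'
-- state: (edge_ids, seen, visited)
def stickB_scan (pe : PySem.Dict Int (List Int)) (bucket : List Int)
    (st : List Int × PySem.Set Int × PySem.Set Int) : List Int × PySem.Set Int × PySem.Set Int :=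
  bucket.foldl (fun st q =>
    if st.2.2.contains q then st
    else
      let new := (pe.getD q []).filter (fun x => decide (x ∉ st.2.1))
      (st.1 ++ new, PySem.Set.update st.2.1 new, PySem.Set.add st.2.2 q)) st

-- 'while i < len(edge_ids)'
def stickB_absorb (pe index : PySem.Dict Int (List Int)) (fuel : Nat) (i : Nat)
    (ids : List Int) (seen vis : PySem.Set Int) : List Int × PySem.Set Int × PySem.Set Int :=
  match fuel with
  | 0 => (ids, seen, vis)
  | fuel + 1 =>
    if h : i < ids.length then
      let st := stickB_scan pe (index.getD ids[i] []) (ids, seen, vis)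
      stickB_absorb pe index fuel (i + 1) st.1 st.2.1 st.2.2
    else (ids, seen, vis)

-- 'for p, p_edges in reversed(items): if p in visited: continue; …'
def stickB_loop (pe index : PySem.Dict Int (List Int)) (fuel : Nat) :
    List (Int × List Int) → PySem.Set Int → List (Int × List Int) → List (Int × List Int)
  | [], _, acc => acc
  | q :: rest, vis, acc =>
    if vis.contains q.1 then stickB_loop pe index fuel rest vis acc
    else
      let st := stickB_absorb pe index fuel 0 q.2 (PySem.Set.ofList q.2) (PySem.Set.add vis q.1)
      stickB_loop pe index fuel rest st.2.2 (acc ++ [(q.1, PySem.Set.ofList st.1)])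

def stick_edge_alt (point_edge_list : List (Int × List Int)) : List (Int × List Int) :=
  let pe := pvNormDict point_edge_list
  let es := pe.items
  stickB_loop pe (stickB_index es) (pvFuel es) es.reverse PySem.Set.empty []

-- ===== PRECONDITION & SPEC =====
def Spec_stick_edge (point_edge_list : List (Int × List Int)) (out : List (Int × List Int)) : Prop := out = stick_edge_alt point_edge_list
instance (point_edge_list : List (Int × List Int)) (out : List (Int × List Int)) : Decidable (Spec_stick_edge point_edge_list out) := by unfold Spec_stick_edge; infer_instance

-- ===== CLAIM (what is proved, stated in full; the proofs are below) =====
def Claim_equal_stick_edge : Prop := ∀ (point_edge_list : List (Int × List Int)), Dom_stick_edge point_edge_list → Spec_stick_edge point_edge_list (stick_edge point_edge_list)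

-- ===== LEMMAS AND PROOFS =====

-- remaining points of es, given the visited set (B's view of A's shrinking dict)
def pvFilt (es : List (Int × List Int)) (vis : PySem.Set Int) : List (Int × List Int) :=
  es.filter (fun q => !(PySem.Set.contains vis q.1))

-- accumulating 'edge_ids += [x for x in v if x not in edge_ids]' over a list of value lists
def pvAcc (ids : List Int) (vs : List (List Int)) : List Int :=
  vs.foldl (fun ids v => ids ++ v.filter (fun x => decide (x ∉ ids))) ids

theorem pv_filter_keys_nodup (es : List (Int × List Int)) (hk : (es.map Prod.fst).Nodup)
    (φ : Int × List Int → Bool) : ((es.filter φ).map Prod.fst).Nodup :=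
  (List.Sublist.map Prod.fst (List.filter_sublist (l := es))).nodup hk

theorem pv_filter_beq_of_nodup (v : List Int) (hn : v.Nodup) (e : Int) :
    v.filter (fun x => x == e) = if e ∈ v then [e] else [] := by
  induction v with
  | nil => simp
  | cons a v ih =>
    rcases List.nodup_cons.mp hn with ⟨ha, hv⟩
    by_cases hae : a = e
    · subst hae
      simp [ih hv, ha]
    · have hea : ¬ (e = a) := fun h => hae h.symm
      simp [hae, ih hv, hea]

theorem pv_not_mem_iff_contains_false (s : PySem.Set Int) (x : Int) :
    PySem.Set.contains s x = false ↔ x ∉ s := by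
  constructor
  · intro h hx
    rw [(PySem.Set.contains_iff ..).mpr hx] at h
    cases h
  · intro hx
    cases hcb : PySem.Set.contains s x
    · rfl
    · exact absurd ((PySem.Set.contains_iff ..).mp hcb) hx

theorem pv_contains_add_ne (vis : PySem.Set Int) (q r : Int) (h : r ≠ q) :
    PySem.Set.contains (PySem.Set.add vis q) r = PySem.Set.contains vis r := by
  cases hcb : PySem.Set.contains vis r
  · have hr : r ∉ vis := (pv_not_mem_iff_contains_false ..).mp hcb
    have hnm : r ∉ PySem.Set.add vis q := by
      intro hm
      rcases (PySem.Set.mem_add ..).mp hm with h' | h'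
      · exact hr h'
      · exact h h'
    exact (pv_not_mem_iff_contains_false ..).mpr hnm
  · have hr : r ∈ vis := (PySem.Set.contains_iff ..).mp hcb
    exact (PySem.Set.contains_iff ..).mpr ((PySem.Set.mem_add ..).mpr (Or.inl hr))

-- the index built by B lists, for each edge, the points whose edge set contains it, in order
theorem pv_index_getD (es : List (Int × List Int)) (hv : ∀ q ∈ es, q.2.Nodup) (e : Int) :
    (stickB_index es).getD e [] = (es.filter (fun q => decide (e ∈ q.2))).map Prod.fst := by
  suffices h : ∀ d : PySem.Dict Int (List Int),
      (es.foldl (fun d q => q.2.foldl (fun d e' => d.modify e' [] (fun l => l ++ [q.1])) d) d).getD e []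
        = d.getD e [] ++ (es.filter (fun q => decide (e ∈ q.2))).map Prod.fst by
    simpa [stickB_index] using h PySem.Dict.empty
  induction es with
  | nil => intro d; simp
  | cons q es ih =>
    intro d
    have hq2 : q.2.Nodup := hv q (List.mem_cons_self ..)
    have hinner : ∀ d : PySem.Dict Int (List Int),
        (q.2.foldl (fun d e' => d.modify e' [] (fun l => l ++ [q.1])) d).getD e []
          = d.getD e [] ++ (if e ∈ q.2 then [q.1] else []) := by
      intro d
      have hmap : q.2.foldl (fun d e' => d.modify e' [] (fun l => l ++ [q.1])) d
          = (q.2.map (fun e' => (e', q.1))).foldl (fun d p => d.modify p.1 [] (fun l => l ++ [p.2])) d := by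
        rw [List.foldl_map]
      rw [hmap, PySem.Dict.getD_foldl_modify_append]
      congr 1
      rw [List.filter_map]
      rw [show ((fun (p : Int × Int) => p.1 == e) ∘ (fun e' => (e', q.1))) = (fun x => x == e)
        from rfl]
      rw [pv_filter_beq_of_nodup q.2 hq2 e]
      by_cases he : e ∈ q.2 <;> simp [he]
    simp only [List.foldl_cons, List.filter_cons]
    rw [ih (fun r hr => hv r (List.mem_cons_of_mem _ hr)), hinner d]
    by_cases he : e ∈ q.2 <;> simp [he]

-- A's inner scan: the first component accumulates the matched values, the second erases
-- the matched keys from the live list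
theorem pvA_scan_char (e : Int) (snap : List (Int × List Int)) :
    ∀ (ids : List Int) (live : List (Int × List Int)),
      stickA_scan e snap (ids, live)
        = (pvAcc ids ((snap.filter (fun q => decide (e ∈ q.2))).map Prod.snd),
           ((snap.filter (fun q => decide (e ∈ q.2))).map Prod.fst).foldl
             (fun l k => l.eraseP (fun r => r.1 == k)) live) := by
  induction snap with
  | nil => intro ids live; rfl
  | cons q snap ih =>
    intro ids live
    simp only [stickA_scan, List.foldl_cons, List.filter_cons]
    by_cases he : e ∈ q.2
    · rw [if_pos he]
      rw [show (snap.foldl _ _ : List Int × List (Int × List Int)) = stickA_scan e snap _ from rfl, ih]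
      simp [pvAcc, he]
    · rw [if_neg he]
      rw [show (snap.foldl _ _ : List Int × List (Int × List Int)) = stickA_scan e snap _ from rfl, ih]
      simp [he]

theorem pv_eraseP_eq_filter (live : List (Int × List Int)) (hk : (live.map Prod.fst).Nodup) (k : Int) :
    live.eraseP (fun r => r.1 == k) = live.filter (fun r => !(r.1 == k)) := by
  induction live with
  | nil => simp
  | cons r live ih =>
    rw [List.map_cons, List.nodup_cons] at hk
    rcases hk with ⟨hr, hlive⟩
    by_cases hrk : r.1 = k
    · subst hrk
      have : live.filter (fun s => !(s.1 == r.1)) = live :=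
        List.filter_eq_self.mpr (fun s hs => by
          have : s.1 ≠ r.1 := fun hc => hr (hc ▸ List.mem_map_of_mem hs)
          simp [this])
      rw [List.eraseP_cons_of_pos (by simp), List.filter_cons_of_neg (by simp)]
      exact this.symm
    · rw [List.eraseP_cons_of_neg (by simp [hrk]), List.filter_cons_of_pos (by simp [hrk]),
        ih hlive]

theorem pv_erase_fold (ks : List Int) :
    ∀ live : List (Int × List Int), (live.map Prod.fst).Nodup →
      ks.foldl (fun l k => l.eraseP (fun r => r.1 == k)) live
        = live.filter (fun r => !(ks.contains r.1)) := by
  induction ks with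
  | nil => intro live _; simp
  | cons k ks ih =>
    intro live hk
    simp only [List.foldl_cons]
    rw [pv_eraseP_eq_filter live hk k]
    rw [ih _ (by
      exact pv_filter_keys_nodup live hk _)]
    rw [List.filter_filter]
    apply List.filter_congr
    intro r _
    simp only [List.contains_cons, Bool.not_or, Bool.and_comm]

-- B's inner scan: same accumulation over the unvisited bucket members (seen stays equal
-- to edge_ids); visited set grows by the whole bucket
theorem pvB_scan_char (pe : PySem.Dict Int (List Int)) (bucket : List Int) :
    ∀ (ids : List Int) (vis : PySem.Set Int), bucket.Nodup →
      (∀ q ∈ bucket, (pe.getD q []).Nodup) →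
      stickB_scan pe bucket (ids, ids, vis)
        = (pvAcc ids ((bucket.filter (fun q => !(PySem.Set.contains vis q))).map (fun q => pe.getD q [])),
           pvAcc ids ((bucket.filter (fun q => !(PySem.Set.contains vis q))).map (fun q => pe.getD q [])),
           PySem.Set.update vis bucket) := by
  induction bucket with
  | nil => intro ids vis _ _; simp [stickB_scan, pvAcc, PySem.Set.update]
  | cons q bucket ih =>
    intro ids vis hnd hvals
    rcases List.nodup_cons.mp hnd with ⟨hq, hbd⟩
    have hvals' : ∀ r ∈ bucket, (pe.getD r []).Nodup :=
      fun r hr => hvals r (List.mem_cons_of_mem _ hr)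
    simp only [stickB_scan, List.foldl_cons, List.filter_cons]
    by_cases hv : PySem.Set.contains vis q
    · have hmem : q ∈ vis := (PySem.Set.contains_iff ..).mp hv
      rw [if_pos hv]
      rw [show (bucket.foldl _ _ : List Int × PySem.Set Int × PySem.Set Int) = stickB_scan pe bucket _ from rfl,
        ih _ _ hbd hvals']
      simp [PySem.Set.update, PySem.Set.add_of_mem hmem, hmem]
    · rw [if_neg hv]
      have hnew : ((pe.getD q []).filter (fun x => decide (x ∉ ids))).Nodup :=
        (hvals q (List.mem_cons_self ..)).filter _
      have hdisj : ∀ x ∈ (pe.getD q []).filter (fun x => decide (x ∉ ids)), x ∉ ids :=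
        fun x hx => by simpa using (List.mem_filter.mp hx).2
      rw [show PySem.Set.update ids ((pe.getD q []).filter (fun x => decide (x ∉ ids)))
            = ids ++ (pe.getD q []).filter (fun x => decide (x ∉ ids)) from
          PySem.Set.update_eq_append_of_disjoint _ _ hnew hdisj]
      rw [show (bucket.foldl _ _ : List Int × PySem.Set Int × PySem.Set Int) = stickB_scan pe bucket _ from rfl,
        ih _ _ hbd hvals']
      have hfil : bucket.filter (fun r => !(PySem.Set.contains (PySem.Set.add vis q) r))
          = bucket.filter (fun r => !(PySem.Set.contains vis r)) := by
        apply List.filter_congr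
        intro r hr
        rw [pv_contains_add_ne vis q r (fun h => hq (h ▸ hr))]
      have hvm : q ∉ vis := fun h => hv ((PySem.Set.contains_iff ..).mpr h)
      rw [hfil]
      simp [pvAcc, PySem.Set.update, hvm]

theorem pvB_scan_mono (pe : PySem.Dict Int (List Int)) (bucket : List Int) (x : Int) :
    ∀ st : List Int × PySem.Set Int × PySem.Set Int, x ∈ st.2.2 → x ∈ (stickB_scan pe bucket st).2.2 := by
  induction bucket with
  | nil => intro st h; simpa [stickB_scan] using h
  | cons q bucket ih =>
    intro st h
    simp only [stickB_scan, List.foldl_cons]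
    by_cases hv : PySem.Set.contains st.2.2 q
    · rw [if_pos hv]
      exact ih st h
    · rw [if_neg hv]
      exact ih _ ((PySem.Set.mem_add ..).mpr (Or.inl h))

theorem pvB_absorb_mono (pe idx : PySem.Dict Int (List Int)) (fuel : Nat) :
    ∀ (i : Nat) (ids : List Int) (seen vis : PySem.Set Int) (x : Int), x ∈ vis →
      x ∈ (stickB_absorb pe idx fuel i ids seen vis).2.2 := by
  induction fuel with
  | zero => intro i ids seen vis x h; simpa [stickB_absorb] using h
  | succ fuel ih =>
    intro i ids seen vis x h
    simp only [stickB_absorb]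
    split
    · exact ih _ _ _ _ _ (pvB_scan_mono pe _ x (ids, seen, vis) h)
    · exact h

-- key-membership in a filtered sublist, under nodup keys
theorem pv_mem_keys_filter (es : List (Int × List Int)) (hk : (es.map Prod.fst).Nodup)
    (q : Int × List Int) (hq : q ∈ es) (φ : Int × List Int → Bool) :
    q.1 ∈ (es.filter φ).map Prod.fst ↔ φ q = true := by
  constructor
  · intro h
    rcases List.mem_map.mp h with ⟨r, hr, hr1⟩
    rcases List.mem_filter.mp hr with ⟨hres, hφ⟩
    have : r = q := List.inj_on_of_nodup_map hk hres hq hr1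
    exact this ▸ hφ
  · intro h
    exact List.mem_map_of_mem (List.mem_filter.mpr ⟨hq, h⟩)

-- one edge step: A's scan over the remaining dict equals B's scan over the bucket
theorem pv_scan_bridge (es : List (Int × List Int)) (hk : (es.map Prod.fst).Nodup)
    (pe : PySem.Dict Int (List Int)) (hpe : ∀ q ∈ es, pe.getD q.1 [] = q.2)
    (hvp : ∀ q ∈ es, q.2.Nodup)
    (e : Int) (ids : List Int) (vis : PySem.Set Int) :
    stickA_scan e (pvFilt es vis) (ids, pvFilt es vis)
      = ((stickB_scan pe ((es.filter (fun q => decide (e ∈ q.2))).map Prod.fst) (ids, ids, vis)).1,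
         pvFilt es (stickB_scan pe ((es.filter (fun q => decide (e ∈ q.2))).map Prod.fst) (ids, ids, vis)).2.2) := by
  set bucket := (es.filter (fun q => decide (e ∈ q.2))).map Prod.fst with hbucket
  have hbnd : bucket.Nodup := pv_filter_keys_nodup es hk _
  have hvals : ∀ r ∈ bucket, (pe.getD r []).Nodup := by
    intro r hr
    rw [hbucket] at hr
    rcases List.mem_map.mp hr with ⟨w, hw, hw1⟩
    have hwes : w ∈ es := (List.mem_filter.mp hw).1
    rw [← hw1, hpe w hwes]
    exact hvp w hwes
  rw [pvA_scan_char, pvB_scan_char pe bucket ids vis hbnd hvals]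
  simp only [Prod.mk.injEq]
  constructor
  · -- first components
    congr 1
    rw [hbucket, List.filter_map, List.map_map]
    unfold pvFilt
    rw [List.filter_filter]
    have hcomm : es.filter (fun a => decide (e ∈ a.2) && !(PySem.Set.contains vis a.1))
        = es.filter (fun a => !(PySem.Set.contains vis a.1) && decide (e ∈ a.2)) := by
      apply List.filter_congr; intro r _; exact Bool.and_comm ..
    rw [hcomm, List.filter_filter]
    apply List.map_congr_left
    intro r hr
    exact (hpe r (List.mem_filter.mp hr).1).symm
  · -- second components
    rw [pv_erase_fold _ _ (by
      unfold pvFilt; exact pv_filter_keys_nodup es hk _)]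
    · unfold pvFilt
      rw [List.filter_filter]
      apply List.filter_congr
      intro q hq
      by_cases hv : q.1 ∈ vis
      · simp [(PySem.Set.contains_iff ..).mpr hv,
          (PySem.Set.contains_iff ..).mpr ((PySem.Set.mem_update ..).mpr (Or.inl hv)), hv]
      · have hqf : q ∈ pvFilt es vis := List.mem_filter.mpr ⟨hq, by simp [hv]⟩
        have hknd : ((pvFilt es vis).map Prod.fst).Nodup := by
          unfold pvFilt; exact pv_filter_keys_nodup es hk _
        have hLiff : q.1 ∈ ((pvFilt es vis).filter (fun r => decide (e ∈ r.2))).map Prod.fst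
            ↔ e ∈ q.2 := by
          rw [pv_mem_keys_filter _ hknd q hqf]; simp
        have hbmem : q.1 ∈ bucket ↔ e ∈ q.2 := by
          rw [hbucket, pv_mem_keys_filter es hk q hq]; simp
        have huiff : q.1 ∈ PySem.Set.update vis bucket ↔ e ∈ q.2 := by
          constructor
          · intro hm
            rcases (PySem.Set.mem_update ..).mp hm with h | h
            · exact absurd h hv
            · exact hbmem.mp h
          · intro hme
            exact (PySem.Set.mem_update ..).mpr (Or.inr (hbmem.mpr hme))
        rw [Bool.eq_iff_iff]
        simp only [← PySem.Set.contains_eq_listContains, Bool.and_eq_true, Bool.not_eq_true',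
          pv_not_mem_iff_contains_false]
        constructor
        · rintro ⟨hL, _⟩ hcu
          exact hL (hLiff.mpr (huiff.mp hcu))
        · intro hnu
          exact ⟨fun hmem => hnu (huiff.mpr (hLiff.mp hmem)), hv⟩

-- the growing-list loop: A over the remaining dict equals B over the index, step by step
theorem pv_absorb_bridge (es : List (Int × List Int)) (hk : (es.map Prod.fst).Nodup)
    (pe idx : PySem.Dict Int (List Int)) (hpe : ∀ q ∈ es, pe.getD q.1 [] = q.2)
    (hvp : ∀ q ∈ es, q.2.Nodup)
    (hidx : ∀ e, idx.getD e [] = (es.filter (fun q => decide (e ∈ q.2))).map Prod.fst)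
    (fuel : Nat) :
    ∀ (i : Nat) (ids : List Int) (vis : PySem.Set Int),
      stickA_absorb fuel i ids (pvFilt es vis)
        = ((stickB_absorb pe idx fuel i ids ids vis).1,
           pvFilt es (stickB_absorb pe idx fuel i ids ids vis).2.2) := by
  induction fuel with
  | zero => intro i ids vis; simp [stickA_absorb, stickB_absorb]
  | succ fuel ih =>
    intro i ids vis
    simp only [stickA_absorb, stickB_absorb]
    split
    · rename_i h
      rw [hidx]
      have hbnd : ((es.filter (fun q => decide (ids[i] ∈ q.2))).map Prod.fst).Nodup :=
        pv_filter_keys_nodup es hk _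
      have hvals : ∀ r ∈ (es.filter (fun q => decide (ids[i] ∈ q.2))).map Prod.fst,
          (pe.getD r []).Nodup := by
        intro r hr
        rcases List.mem_map.mp hr with ⟨w, hw, hw1⟩
        have hwes : w ∈ es := (List.mem_filter.mp hw).1
        rw [← hw1, hpe w hwes]
        exact hvp w hwes
      have hseen := pvB_scan_char pe ((es.filter (fun q => decide (ids[i] ∈ q.2))).map Prod.fst)
        ids vis hbnd hvals
      rw [pv_scan_bridge es hk pe hpe hvp _ ids vis, hseen]
      exact ih _ _ _
    · rfl

-- A's whole while-loop equals B's reverse for-loop, by downward induction on the prefix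
theorem pv_loop_bridge (es : List (Int × List Int)) (hk : (es.map Prod.fst).Nodup)
    (pe idx : PySem.Dict Int (List Int)) (hpe : ∀ q ∈ es, pe.getD q.1 [] = q.2)
    (hvp : ∀ q ∈ es, q.2.Nodup)
    (hidx : ∀ e, idx.getD e [] = (es.filter (fun q => decide (e ∈ q.2))).map Prod.fst)
    (fuel : Nat) :
    ∀ (k : Nat), k ≤ es.length →
      ∀ (vis : PySem.Set Int) (acc : List (Int × List Int)),
        (∀ q ∈ es.drop k, q.1 ∈ vis) →
        stickA_loop fuel (pvFilt es vis) acc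
          = stickB_loop pe idx fuel ((es.take k).reverse) vis acc := by
  intro k
  induction k with
  | zero =>
    intro _ vis acc hvis
    have : pvFilt es vis = [] := by
      unfold pvFilt
      rw [List.filter_eq_nil_iff]
      intro q hq
      have hm : q.1 ∈ vis := hvis q (by simpa using hq)
      simp [(PySem.Set.contains_iff ..).mpr hm, hm]
    rw [this, stickA_loop]
    simp [stickB_loop]
  | succ k ih =>
    intro hk1 vis acc hvis
    have hklt : k < es.length := hk1
    have htake : (es.take (k+1)).reverse = es[k] :: (es.take k).reverse := by
      rw [List.take_add_one, List.getElem?_eq_getElem hklt]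
      simp
    have hdropk : es.drop k = es[k] :: es.drop (k+1) := List.drop_eq_getElem_cons hklt
    have hqknotin : es[k].1 ∉ (es.take k).map Prod.fst := by
      intro hmem
      have hnth : es.map Prod.fst = (es.take k).map Prod.fst ++ es[k].1 :: (es.drop (k+1)).map Prod.fst := by
        conv_lhs => rw [← List.take_append_drop k es, hdropk]
        rw [List.map_append, List.map_cons]
      rw [hnth] at hk
      exact List.disjoint_of_nodup_append hk hmem (List.mem_cons_self ..)
    rw [htake]
    by_cases hq : es[k].1 ∈ vis
    · rw [stickB_loop]
      simp only [(PySem.Set.contains_iff ..).mpr hq, if_pos]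
      refine ih (le_of_lt hklt) vis acc ?_
      rw [hdropk]
      intro q hmem
      rcases List.mem_cons.mp hmem with h | h
      · exact h ▸ hq
      · exact hvis q h
    · -- B takes the component branch; A pops es[k]
      have hcq : PySem.Set.contains vis es[k].1 = false := (pv_not_mem_iff_contains_false ..).mpr hq
      have hdroprest : (es.drop (k+1)).filter (fun r => !(PySem.Set.contains vis r.1)) = [] := by
        rw [List.filter_eq_nil_iff]
        intro q hqd
        have hm : q.1 ∈ vis := hvis q hqd
        simp [(PySem.Set.contains_iff ..).mpr hm, hm]
      have hsplit : pvFilt es vis = (es.take k).filter (fun r => !(PySem.Set.contains vis r.1)) ++ [es[k]] := by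
        unfold pvFilt
        generalize hgx : es[k] = x at hdropk hcq hq ⊢
        conv_lhs => rw [← List.take_append_drop k es, hdropk]
        rw [List.filter_append, List.filter_cons, if_pos (by simp [hq]), hdroprest]
      have hne : pvFilt es vis ≠ [] := by rw [hsplit]; simp
      rw [stickA_loop, dif_neg hne]
      have hlast : (pvFilt es vis).getLast hne = es[k] := by
        have h2 : (pvFilt es vis).getLast? = some es[k] := by
          rw [hsplit]; simp
        rwa [List.getLast?_eq_getLast hne, Option.some_inj] at h2
      have hdl : (pvFilt es vis).dropLast = (es.take k).filter (fun r => !(PySem.Set.contains vis r.1)) := by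
        rw [hsplit]; exact List.dropLast_concat
      have hvis1 : (pvFilt es vis).dropLast = pvFilt es (PySem.Set.add vis es[k].1) := by
        rw [hdl]
        unfold pvFilt
        generalize hgx : es[k] = x at hdropk hqknotin hq hcq ⊢
        have hxfalse : ¬ ((!(PySem.Set.contains (PySem.Set.add vis x.1) x.1)) = true) := by
          have hm : x.1 ∈ PySem.Set.add vis x.1 := (PySem.Set.mem_add ..).mpr (Or.inr rfl)
          simp [(PySem.Set.contains_iff ..).mpr hm, hm]
        have hnil : (es.drop (k+1)).filter (fun r => !(PySem.Set.contains (PySem.Set.add vis x.1) r.1)) = [] := by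
          rw [List.filter_eq_nil_iff]
          intro q hqd
          have hm : q.1 ∈ PySem.Set.add vis x.1 := (PySem.Set.mem_add ..).mpr (Or.inl (hvis q hqd))
          simp [(PySem.Set.contains_iff ..).mpr hm, hm]
        have hcong : ∀ r ∈ es.take k,
            (!(PySem.Set.contains vis r.1)) = (!(PySem.Set.contains (PySem.Set.add vis x.1) r.1)) := by
          intro r hr
          have hrne : r.1 ≠ x.1 := fun hc => hqknotin (hc ▸ List.mem_map_of_mem hr)
          rw [pv_contains_add_ne vis x.1 r.1 hrne]
        conv_rhs => rw [← List.take_append_drop k es, hdropk]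
        rw [List.filter_append, List.filter_cons, if_neg hxfalse, hnil, List.append_nil]
        exact List.filter_congr hcong
      rw [stickB_loop]
      simp only [hcq, Bool.false_eq_true, if_false]
      have hq2nd : es[k].2.Nodup := hvp es[k] (List.getElem_mem hklt)
      rw [PySem.Set.ofList_eq_self_of_nodup _ hq2nd]
      have habs := pv_absorb_bridge es hk pe idx hpe hvp hidx fuel 0 es[k].2 (PySem.Set.add vis es[k].1)
      rw [hlast, hvis1, habs]
      refine ih (le_of_lt hklt) _ _ ?_
      intro q hqd
      rw [hdropk] at hqd
      have hbase : ∀ x, x ∈ PySem.Set.add vis es[k].1 →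
          x ∈ (stickB_absorb pe idx fuel 0 es[k].2 es[k].2 (PySem.Set.add vis es[k].1)).2.2 :=
        fun x hx => pvB_absorb_mono pe idx fuel 0 es[k].2 es[k].2 _ x hx
      rcases List.mem_cons.mp hqd with h | h
      · exact hbase _ ((PySem.Set.mem_add ..).mpr (Or.inr (by rw [h])))
      · exact hbase _ ((PySem.Set.mem_add ..).mpr (Or.inl (hvis q h)))

-- properties of the normalized dict: nodup keys, nodup values, lookup of its own items
theorem pv_norm_keys_nodup (l : List (Int × List Int)) : (pvNormDict l).keys.Nodup := by
  unfold pvNormDict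
  exact PySem.Dict.nodup_keys_foldl_insert_key l Prod.fst
    (fun d kv => PySem.Set.ofList kv.2) PySem.Dict.empty PySem.Dict.nodup_keys_empty

theorem pv_norm_values_nodup (l : List (Int × List Int)) :
    ∀ q ∈ (pvNormDict l).items, q.2.Nodup := by
  unfold pvNormDict
  suffices h : ∀ d : PySem.Dict Int (List Int), (∀ q ∈ d.items, q.2.Nodup) →
      ∀ q ∈ (l.foldl (fun d kv => d.insert kv.1 (PySem.Set.ofList kv.2)) d).items, q.2.Nodup by
    exact h PySem.Dict.empty (by simp [PySem.Dict.empty])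
  induction l with
  | nil => intro d hd; simpa using hd
  | cons kv l ih =>
    intro d hd
    simp only [List.foldl_cons]
    refine ih _ ?_
    intro q hq
    rcases (PySem.Dict.mem_items_insert ..).mp hq with h | h
    · rw [h]; exact PySem.Set.nodup_ofList ..
    · exact hd q h.1

theorem pv_norm_getD (l : List (Int × List Int)) :
    ∀ q ∈ (pvNormDict l).items, (pvNormDict l).getD q.1 [] = q.2 := by
  intro q hq
  have hq' : (q.1, q.2) ∈ (pvNormDict l).items := by simpa using hq
  exact PySem.Dict.getD_of_mem_items _ hq' (pv_norm_keys_nodup l) []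

-- ===== VERDICT (by name: the statement is the Claim_ definition above) =====
theorem stick_edge_spec : Claim_equal_stick_edge := by
  intro l _
  unfold Spec_stick_edge stick_edge stick_edge_alt
  have hk : (((pvNormDict l).items.map Prod.fst)).Nodup := pv_norm_keys_nodup l
  have hfull := pv_loop_bridge (pvNormDict l).items hk (pvNormDict l) (stickB_index (pvNormDict l).items)
    (pv_norm_getD l) (pv_norm_values_nodup l)
    (fun e => pv_index_getD (pvNormDict l).items (pv_norm_values_nodup l) e)
    (pvFuel (pvNormDict l).items) (pvNormDict l).items.length (le_refl _) PySem.Set.empty []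
    (by simp)
  have hfilt : pvFilt (pvNormDict l).items PySem.Set.empty = (pvNormDict l).items := by
    unfold pvFilt
    apply List.filter_eq_self.mpr
    intro q _
    simp [PySem.Set.empty, PySem.Set.contains]
  rw [hfilt, List.take_length] at hfull
  exact hfull
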